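-- pv_equiv track=rewrite | github.com/yangfei222666-9/aios | aios/AIOS-Portable/agent_system/agents/dependency_manager.py | _generate_execution_plan
-- ===== SOURCE A (Python) =====
-- def _generate_execution_plan(execution_order, dependencies):
--     """生成分阶段执行计划（同一阶段的任务可并行）"""
--     completed = set()
--     plan = []
--
--     while execution_order:
--         # 找出当前可执行的任务
--         stage = []
--         remaining = []
--
--         for task_id in execution_order:
--             deps = dependencies.get(task_id, [])
--             if all(dep in completed for dep in deps):
--                 stage.append(task_id)
--             else:
--                 remaining.append(task_id)
--
--         if not stage:
--             break  # 无法继续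
--
--         plan.append(stage)
--         completed.update(stage)
--         execution_order = remaining
--
--     return plan
-- ===== SOURCE B (Python) =====
-- def _generate_execution_plan(execution_order, dependencies):
--     """Level-labelling reformulation: compute each task's stage number by iterating a
--     max-of-dependencies recurrence to a fixpoint, then bucket the order by level."""
--     distinct = list(dict.fromkeys(execution_order))
--     tasks = set(distinct)
--     n = len(distinct)
--     lvl = {t: 0 for t in distinct}
--     for _ in range(n):
--         new = {}
--         for t in distinct:
--             ds = dependencies.get(t, [])
--             if any(d not in tasks for d in ds):
--                 new[t] = n  # depends on a task that is never scheduled: blocked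
--             else:
--                 m = -1
--                 for d in ds:
--                     if lvl[d] > m:
--                         m = lvl[d]
--                 new[t] = min(n, m + 1)
--         if new == lvl:
--             break
--         lvl = new
--     K = 0
--     for v in lvl.values():
--         if v < n and v + 1 > K:
--             K = v + 1
--     stages = [[t for t in execution_order if lvl[t] == k] for k in range(K)]
--     return [s for s in stages if s]
-- ===== Notes on version B (the rewrite author's own statement) =====
-- stated objective: alternative
-- what changed: A repeatedly rescans the remaining tasks, peeling off one ready stage per pass of a while-loop over a growing 'completed' set; B instead computes each task's stage number directly, by iterating a max-of-dependency-levels recurrence over the distinct tasks to a fixpoint (missing dependencies marked unreachable), and then buckets execution_order by level.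
import Mathlib
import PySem

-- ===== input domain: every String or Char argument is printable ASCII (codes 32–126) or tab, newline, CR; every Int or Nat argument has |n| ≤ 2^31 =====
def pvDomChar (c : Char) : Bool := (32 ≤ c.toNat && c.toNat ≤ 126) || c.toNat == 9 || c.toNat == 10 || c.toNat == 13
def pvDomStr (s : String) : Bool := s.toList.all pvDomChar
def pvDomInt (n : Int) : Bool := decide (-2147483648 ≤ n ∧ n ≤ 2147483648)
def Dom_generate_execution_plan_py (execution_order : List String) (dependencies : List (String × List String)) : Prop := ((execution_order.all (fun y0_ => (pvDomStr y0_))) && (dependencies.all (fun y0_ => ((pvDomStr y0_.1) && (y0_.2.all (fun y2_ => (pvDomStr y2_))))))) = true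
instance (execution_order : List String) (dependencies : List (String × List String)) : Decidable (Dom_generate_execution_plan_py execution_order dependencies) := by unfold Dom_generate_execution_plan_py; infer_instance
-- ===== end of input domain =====

-- B replaces A's repeated rescans of the remaining tasks by per-task stage labels computed
-- from a max-of-dependency-levels recurrence iterated to a fixpoint (objective: alternative).

-- ===== PORT A =====
-- dependencies.get(task_id, [])
def pvDepsOf (dependencies : List (String × List String)) (t : String) : List String :=
  (PySem.Dict.mk dependencies).getD t []

-- the while-loop of A; the for-loop building stage/remaining is the partition fold
def pvPlanLoop (dependencies : List (String × List String)) (completed : PySem.Set String)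
    (execution_order : List String) : List (List String) :=
  if execution_order.isEmpty then []
  else
    let pr := execution_order.partition
        (fun t => (pvDepsOf dependencies t).all (fun d => PySem.Set.contains completed d))
    if h : pr.1.isEmpty then []
    else pr.1 :: pvPlanLoop dependencies (PySem.Set.update completed pr.1) pr.2
termination_by execution_order.length
decreasing_by
  rw [Bool.not_eq_true, List.isEmpty_eq_false_iff] at h
  simp only [pr, List.partition_eq_filter_filter] at h
  rcases List.exists_mem_of_ne_nil _ h with ⟨x, hx⟩
  have hx' := List.of_mem_filter hx
  have hxm := List.mem_of_mem_filter hx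
  simp only [List.partition_eq_filter_filter]
  apply List.length_filter_lt_length_iff_exists.mpr
  exact ⟨x, hxm, by simpa using hx'⟩

def generate_execution_plan_py (execution_order : List String) (dependencies : List (String × List String)) : List (List String) :=
  pvPlanLoop dependencies PySem.Set.empty execution_order

-- ===== PORT B =====
-- one round of Source B's relaxation: new[t] = n if a dep is missing, else min(n, 1 + max dep level)
def pvRoundStep (dependencies : List (String × List String)) (tasks : PySem.Set String)
    (n : Int) (distinct : List String) (lvl : PySem.Dict String Int) : PySem.Dict String Int :=
  distinct.foldl (fun new t =>
    if (pvDepsOf dependencies t).any (fun d => !(PySem.Set.contains tasks d)) then new.insert t n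
    else new.insert t (min n
      (((pvDepsOf dependencies t).foldl
        (fun m d => if lvl.getD d n > m then lvl.getD d n else m) (-1)) + 1)))
    PySem.Dict.empty
-- (lvl[d] is read only when d ∈ tasks, where the key is always present: the getD default is never used)

-- Source B's 'for _ in range(n): … if new == lvl: break'.  Both dicts list their keys in
-- `distinct` order, so Python's order-insensitive dict == coincides with list equality here.
def pvRounds (dependencies : List (String × List String)) (tasks : PySem.Set String)
    (n : Int) (distinct : List String) : Nat → PySem.Dict String Int → PySem.Dict String Int
  | 0, lvl => lvl
  | fuel+1, lvl =>
    let new := pvRoundStep dependencies tasks n distinct lvl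
    if new = lvl then lvl else pvRounds dependencies tasks n distinct fuel new

def generate_execution_plan_py_alt (execution_order : List String) (dependencies : List (String × List String)) : List (List String) :=
  let distinct := PySem.List.dedup execution_order
  let tasks := PySem.Set.ofList distinct
  let n := distinct.length
  let lvl0 := distinct.foldl (fun d t => d.insert t (0 : Int)) PySem.Dict.empty
  let lvl := pvRounds dependencies tasks (n : Int) distinct n lvl0
  let K := lvl.values.foldl (fun K v => if v < (n : Int) && v + 1 > K then v + 1 else K) 0
  -- range(K): K is an int ≥ 0 by construction, so toNat is exact
  let stages := (List.range K.toNat).map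
    (fun (k : Nat) => execution_order.filter (fun t => lvl.getD t (n : Int) == ((k : Int))))
  stages.filter (fun s => !s.isEmpty)

-- ===== PRECONDITION & SPEC =====
def Spec_generate_execution_plan_py (execution_order : List String) (dependencies : List (String × List String)) (out : List (List String)) : Prop := out = generate_execution_plan_py_alt execution_order dependencies
instance (execution_order : List String) (dependencies : List (String × List String)) (out : List (List String)) : Decidable (Spec_generate_execution_plan_py execution_order dependencies out) := by unfold Spec_generate_execution_plan_py; infer_instance

-- ===== CLAIM (what is proved, stated in full; the proofs are below) =====
def Claim_equal_generate_execution_plan_py : Prop := ∀ (execution_order : List String) (dependencies : List (String × List String)), Dom_generate_execution_plan_py execution_order dependencies → Spec_generate_execution_plan_py execution_order dependencies (generate_execution_plan_py execution_order dependencies)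

-- ===== LEMMAS AND PROOFS =====

-- C_k, the set of tasks schedulable within the first k stages:
-- C_0 = ∅, C_{k+1} = {t ∈ D | deps(t) ⊆ C_k}  (D = the distinct tasks of execution_order)
def pvInC (dependencies : List (String × List String)) (D : List String) : Nat → String → Bool
  | 0, _ => false
  | k+1, t => D.contains t && (pvDepsOf dependencies t).all (fun d => pvInC dependencies D k d)

-- "t is scheduled exactly in stage k"
def pvAtLvl (dependencies : List (String × List String)) (D : List String) (k : Nat) (t : String) : Bool :=
  pvInC dependencies D (k+1) t && !(pvInC dependencies D k t)

def pvStage (dependencies : List (String × List String)) (eo : List String) (j : Nat) : List String :=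
  eo.filter (fun t => pvAtLvl dependencies (PySem.Set.ofList eo) j t)

def pvTail (dependencies : List (String × List String)) (eo : List String) (k : Nat) : List (List String) :=
  ((List.range' k ((PySem.Set.ofList eo).length - k)).map (pvStage dependencies eo)).filter
    (fun s => !s.isEmpty)

-- the pointwise recurrence Source B's rounds compute
def pvStepF (dependencies : List (String × List String)) (D : List String)
    (g : String → Int) (t : String) : Int :=
  if (pvDepsOf dependencies t).any (fun d => !(D.contains d)) then (D.length : Int)
  else min (D.length : Int)
    (((pvDepsOf dependencies t).foldl (fun m d => if g d > m then g d else m) (-1)) + 1)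

def pvFIter (dependencies : List (String × List String)) (D : List String) : Nat → String → Int
  | 0, _ => 0
  | r+1, t => pvStepF dependencies D (pvFIter dependencies D r) t

theorem pvInC_succ (dependencies : List (String × List String)) (D : List String) (k : Nat)
    (t : String) : pvInC dependencies D (k+1) t
      = (D.contains t && (pvDepsOf dependencies t).all (fun d => pvInC dependencies D k d)) := rfl

theorem pvInC_not_mem (dependencies : List (String × List String)) (D : List String) (k : Nat)
    (t : String) (ht : ¬ t ∈ D) : pvInC dependencies D k t = false := by
  cases k with
  | zero => rfl
  | succ k =>
    have hc : D.contains t = false := by simpa using ht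
    rw [pvInC_succ, hc, Bool.false_and]

theorem pvInC_mem (dependencies : List (String × List String)) (D : List String) (k : Nat)
    (t : String) (h : pvInC dependencies D (k+1) t = true) : t ∈ D := by
  rw [pvInC_succ, Bool.and_eq_true] at h
  simpa using h.1

theorem pvInC_succ_iff (dependencies : List (String × List String)) (D : List String) (k : Nat)
    (t : String) : pvInC dependencies D (k+1) t = true
      ↔ t ∈ D ∧ ∀ d ∈ pvDepsOf dependencies t, pvInC dependencies D k d = true := by
  rw [pvInC_succ]
  simp

theorem pvInC_mono (dependencies : List (String × List String)) (D : List String) (k : Nat) :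
    ∀ t, pvInC dependencies D k t = true → pvInC dependencies D (k+1) t = true := by
  induction k with
  | zero => intro t h; simp [pvInC] at h
  | succ k ih =>
    intro t h
    rw [pvInC_succ_iff] at h ⊢
    exact ⟨h.1, fun d hd => ih d (h.2 d hd)⟩

theorem pvInC_mono_le (dependencies : List (String × List String)) (D : List String)
    {j k : Nat} (hjk : j ≤ k) :
    ∀ t, pvInC dependencies D j t = true → pvInC dependencies D k t = true := by
  induction k, hjk using Nat.le_induction with
  | base => exact fun t h => h
  | succ k hk ih => exact fun t h => pvInC_mono dependencies D k t (ih t h)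

theorem pvCountP_lt {l : List String} {p q : String → Bool}
    (hpq : ∀ x ∈ l, p x = true → q x = true) {x : String} (hx : x ∈ l)
    (hqx : q x = true) (hpx : p x = false) : l.countP p < l.countP q := by
  induction l with
  | nil => cases hx
  | cons a l ih =>
    have hmono : l.countP p ≤ l.countP q :=
      List.countP_mono_left (fun y hy => hpq y (List.mem_cons_of_mem a hy))
    rcases List.mem_cons.mp hx with rfl | hx'
    · rw [List.countP_cons_of_neg (p := p) (by simp [hpx]), List.countP_cons_of_pos (p := q) hqx]
      omega
    · have hih := ih (fun y hy hp => hpq y (List.mem_cons_of_mem a hy) hp) hx'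
      simp only [List.countP_cons]
      have hcnt : (if p a = true then 1 else 0) ≤ (if q a = true then 1 else 0) := by
        by_cases hpa : p a = true
        · simp [hpa, hpq a List.mem_cons_self hpa]
        · simp [hpa]
      omega

theorem pvLevel_lt_countP (dependencies : List (String × List String)) (D : List String) :
    ∀ (k : Nat) (t : String), pvInC dependencies D (k+1) t = true →
      pvInC dependencies D k t = false →
      k < D.countP (pvInC dependencies D (k+1)) := by
  intro k
  induction k using Nat.strong_induction_on with
  | _ k ih =>
    intro t h1 h0
    have ht : t ∈ D := pvInC_mem dependencies D k t h1
    match k, h1, h0 with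
    | 0, h1, h0 =>
      have : 0 < D.countP (pvInC dependencies D 1) :=
        List.countP_pos_iff.mpr ⟨t, ht, h1⟩
      omega
    | k'+1, h1, h0 =>
      -- t has a dependency at exactly level k'
      have hcont : D.contains t = true := by simpa using ht
      have h0' : ((pvDepsOf dependencies t).all
          (fun d => pvInC dependencies D k' d)) = false := by
        rw [pvInC_succ, hcont, Bool.true_and] at h0
        exact h0
      rw [List.all_eq_false] at h0'
      rcases h0' with ⟨d, hd, hdk'⟩
      have hdk : pvInC dependencies D (k'+1) d = true :=
        (pvInC_succ_iff dependencies D (k'+1) t).mp h1 |>.2 d hd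
      have hlt := ih k' (by omega) d hdk (by simpa using hdk')
      have hstrict : D.countP (pvInC dependencies D (k'+1))
          < D.countP (pvInC dependencies D (k'+2)) :=
        pvCountP_lt (fun y _ hy => pvInC_mono dependencies D (k'+1) y hy) ht h1 h0
      exact lt_of_le_of_lt hlt hstrict

theorem pvLevel_lt (dependencies : List (String × List String)) (D : List String)
    (k : Nat) (t : String)
    (h1 : pvInC dependencies D (k+1) t = true) (h0 : pvInC dependencies D k t = false) :
    k < D.length := by
  have h := pvLevel_lt_countP dependencies D k t h1 h0
  have h2 := List.countP_le_length (l := D) (p := pvInC dependencies D (k+1))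
  omega

theorem pvInC_stab_one (dependencies : List (String × List String)) (D : List String) (k : Nat)
    (h : ∀ t ∈ D, pvInC dependencies D (k+1) t = pvInC dependencies D k t) :
    ∀ t ∈ D, pvInC dependencies D (k+2) t = pvInC dependencies D (k+1) t := by
  intro t ht
  have hall : ∀ d, pvInC dependencies D (k+1) d = pvInC dependencies D k d := by
    intro d
    by_cases hd : d ∈ D
    · exact h d hd
    · rw [pvInC_not_mem dependencies D _ d hd, pvInC_not_mem dependencies D _ d hd]
  rw [pvInC_succ dependencies D (k+1) t, pvInC_succ dependencies D k t]
  simp only [hall]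

theorem pvInC_stab (dependencies : List (String × List String)) (D : List String) (k : Nat)
    (h : ∀ t ∈ D, pvInC dependencies D (k+1) t = pvInC dependencies D k t) :
    ∀ j, k ≤ j → ∀ t ∈ D, pvInC dependencies D (j+1) t = pvInC dependencies D j t := by
  intro j hj
  induction j, hj using Nat.le_induction with
  | base => exact h
  | succ j hj ih => exact pvInC_stab_one dependencies D j ih

theorem pvStage_empty_tail (dependencies : List (String × List String)) (eo : List String)
    (k : Nat) (h : ∀ j, k ≤ j → pvStage dependencies eo j = []) :
    pvTail dependencies eo k = [] := by
  unfold pvTail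
  rw [List.filter_eq_nil_iff]
  intro s hs
  rcases List.mem_map.mp hs with ⟨j, hj, rfl⟩
  have hje := h j (List.mem_range'_1.mp hj).1
  simp [hje]

theorem pvTail_eq_nil_of_filter (dependencies : List (String × List String)) (eo : List String)
    (k : Nat)
    (h : eo.filter (fun t => !(pvInC dependencies (PySem.Set.ofList eo) k t)) = []) :
    pvTail dependencies eo k = [] := by
  apply pvStage_empty_tail
  intro j hj
  unfold pvStage
  rw [List.filter_eq_nil_iff]
  intro t ht
  have hik : pvInC dependencies (PySem.Set.ofList eo) k t = true := by
    by_contra hfalse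
    have hmem : t ∈ eo.filter (fun t => !(pvInC dependencies (PySem.Set.ofList eo) k t)) :=
      List.mem_filter.mpr ⟨ht, by simp [hfalse]⟩
    rw [h] at hmem
    cases hmem
  have hij := pvInC_mono_le dependencies (PySem.Set.ofList eo) hj t hik
  simp [pvAtLvl, hij]

theorem pvTail_eq_nil_of_stage_empty (dependencies : List (String × List String))
    (eo : List String) (k : Nat) (h : pvStage dependencies eo k = []) :
    pvTail dependencies eo k = [] := by
  have hpoint : ∀ t ∈ PySem.Set.ofList eo,
      pvInC dependencies (PySem.Set.ofList eo) (k+1) t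
        = pvInC dependencies (PySem.Set.ofList eo) k t := by
    intro t ht
    have hte : t ∈ eo := (PySem.Set.mem_ofList eo t).mp ht
    have hat : pvAtLvl dependencies (PySem.Set.ofList eo) k t = false := by
      by_contra hfalse
      have : t ∈ pvStage dependencies eo k :=
        List.mem_filter.mpr ⟨hte, by simpa using hfalse⟩
      rw [h] at this
      cases this
    cases h1 : pvInC dependencies (PySem.Set.ofList eo) (k+1) t with
    | false =>
      cases h0 : pvInC dependencies (PySem.Set.ofList eo) k t with
      | false => rfl
      | true => rw [← h1, pvInC_mono dependencies (PySem.Set.ofList eo) k t h0]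
    | true =>
      simp only [pvAtLvl, h1, Bool.true_and, Bool.not_eq_eq_eq_not, Bool.not_false] at hat
      rw [hat]
  have hstab := pvInC_stab dependencies (PySem.Set.ofList eo) k hpoint
  apply pvStage_empty_tail
  intro j hj
  unfold pvStage
  rw [List.filter_eq_nil_iff]
  intro t ht
  have htD : t ∈ PySem.Set.ofList eo := (PySem.Set.mem_ofList eo t).mpr ht
  have heq := hstab j hj t htD
  simp [pvAtLvl, heq]

theorem pvPlanLoop_eq (dependencies : List (String × List String)) (eo : List String) :
    ∀ (N : Nat) (R : List String) (k : Nat) (S : PySem.Set String), R.length ≤ N →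
      (∀ s, S.contains s = pvInC dependencies (PySem.Set.ofList eo) k s) →
      R = eo.filter (fun t => !(pvInC dependencies (PySem.Set.ofList eo) k t)) →
      pvPlanLoop dependencies S R = pvTail dependencies eo k := by
  intro N
  induction N with
  | zero =>
    intro R k S hlen hS hR
    have hRnil : R = [] := List.length_eq_zero_iff.mp (Nat.le_zero.mp hlen)
    subst hRnil
    rw [pvPlanLoop]
    simp only [List.isEmpty_nil, if_pos]
    exact (pvTail_eq_nil_of_filter dependencies eo k hR.symm).symm
  | succ N ih =>
    intro R k S hlen hS hR
    by_cases hRe : R.isEmpty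
    · rw [pvPlanLoop, if_pos hRe]
      exact (pvTail_eq_nil_of_filter dependencies eo k
        (by rw [← hR]; exact List.isEmpty_iff.mp hRe)).symm
    · -- pointwise: the stage test equals membership in C_{k+1}
      have hpeq : ∀ t ∈ eo,
          ((pvDepsOf dependencies t).all (fun d => PySem.Set.contains S d))
            = pvInC dependencies (PySem.Set.ofList eo) (k+1) t := by
        intro t ht
        have hc : List.contains (PySem.Set.ofList eo) t = true := by
          simpa [List.contains_eq_mem] using (PySem.Set.mem_ofList eo t).mpr ht
        rw [pvInC_succ, hc, Bool.true_and]
        simp only [hS]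
      have hstage : R.filter (fun t => (pvDepsOf dependencies t).all
            (fun d => PySem.Set.contains S d)) = pvStage dependencies eo k := by
        rw [hR, List.filter_filter]
        apply List.filter_congr
        intro t ht
        rw [hpeq t ht]
        rfl
      have hrem : R.filter (fun t => !((pvDepsOf dependencies t).all
            (fun d => PySem.Set.contains S d)))
          = eo.filter (fun t => !(pvInC dependencies (PySem.Set.ofList eo) (k+1) t)) := by
        rw [hR, List.filter_filter]
        apply List.filter_congr
        intro t ht
        rw [hpeq t ht]
        cases h1 : pvInC dependencies (PySem.Set.ofList eo) (k+1) t with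
        | true => simp
        | false =>
          have h0 : pvInC dependencies (PySem.Set.ofList eo) k t = false := by
            cases h0 : pvInC dependencies (PySem.Set.ofList eo) k t with
            | false => rfl
            | true => rw [← h1, pvInC_mono dependencies (PySem.Set.ofList eo) k t h0]
          simp [h0]
      rw [pvPlanLoop, if_neg hRe]
      simp only [List.partition_eq_filter_filter, Function.comp_def]
      rw [hstage, hrem]
      by_cases hse : (pvStage dependencies eo k).isEmpty
      · rw [dif_pos hse]
        exact (pvTail_eq_nil_of_stage_empty dependencies eo k
          (List.isEmpty_iff.mp hse)).symm
      · rw [dif_neg hse]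
        -- the stage is nonempty: some task sits at exactly level k, so k < |D|
        have hne : pvStage dependencies eo k ≠ [] := by simpa [List.isEmpty_iff] using hse
        rcases List.exists_mem_of_ne_nil _ hne with ⟨w, hw⟩
        have hwat := List.of_mem_filter hw
        have hw1 : pvInC dependencies (PySem.Set.ofList eo) (k+1) w = true :=
          (Bool.and_eq_true_iff.mp hwat).1
        have hw0 : pvInC dependencies (PySem.Set.ofList eo) k w = false := by
          have := (Bool.and_eq_true_iff.mp hwat).2
          simpa using this
        have hkn : k < (PySem.Set.ofList eo).length :=
          pvLevel_lt dependencies (PySem.Set.ofList eo) k w hw1 hw0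
        have htail : pvTail dependencies eo k
            = pvStage dependencies eo k :: pvTail dependencies eo (k+1) := by
          unfold pvTail
          have hsub : (PySem.Set.ofList eo).length - k
              = ((PySem.Set.ofList eo).length - (k+1)) + 1 := by omega
          rw [hsub, List.range'_succ, List.map_cons,
            List.filter_cons_of_pos (by simpa [List.isEmpty_iff] using hne)]
        rw [htail]
        -- new completed set satisfies the invariant at k+1
        have hS' : ∀ s, (PySem.Set.update S (pvStage dependencies eo k)).contains s
            = pvInC dependencies (PySem.Set.ofList eo) (k+1) s := by
          intro s
          have hm : (PySem.Set.update S (pvStage dependencies eo k)).contains s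
              = (S.contains s || decide (s ∈ pvStage dependencies eo k)) := by
            simp [PySem.Set.contains_eq_listContains, List.contains_eq_mem, PySem.Set.mem_update]
          rw [hm, hS s]
          by_cases h1 : pvInC dependencies (PySem.Set.ofList eo) (k+1) s = true
          · rw [h1]
            by_cases h0 : pvInC dependencies (PySem.Set.ofList eo) k s = true
            · simp [h0]
            · have hsD : s ∈ PySem.Set.ofList eo := pvInC_mem dependencies _ k s h1
              have hsm : s ∈ pvStage dependencies eo k :=
                List.mem_filter.mpr ⟨(PySem.Set.mem_ofList eo s).mp hsD,
                  by simp [pvAtLvl, h1, Bool.eq_false_iff.mpr h0]⟩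
              simp [hsm]
          · have h1' : pvInC dependencies (PySem.Set.ofList eo) (k+1) s = false := by
              simpa using h1
            have h0 : pvInC dependencies (PySem.Set.ofList eo) k s = false := by
              cases h0 : pvInC dependencies (PySem.Set.ofList eo) k s with
              | false => rfl
              | true => rw [← h1', pvInC_mono dependencies (PySem.Set.ofList eo) k s h0]
            have hnm : s ∉ pvStage dependencies eo k := by
              intro hmem
              have := (List.mem_filter.mp hmem).2
              simp [pvAtLvl, h1'] at this
            rw [h1', h0]
            simp [hnm]
        -- the remaining list is shorter
        have hlen' : (eo.filter (fun t =>
            !(pvInC dependencies (PySem.Set.ofList eo) (k+1) t))).length ≤ N := by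
          have hlt : (R.filter (fun t => !((pvDepsOf dependencies t).all
              (fun d => PySem.Set.contains S d)))).length < R.length := by
            rcases List.exists_mem_of_ne_nil _ (hstage ▸ hne) with ⟨x, hx⟩
            have hx' := List.of_mem_filter hx
            have hxm := List.mem_of_mem_filter hx
            apply List.length_filter_lt_length_iff_exists.mpr
            exact ⟨x, hxm, by simpa using hx'⟩
          rw [hrem] at hlt
          omega
        exact congrArg₂ List.cons rfl (ih _ (k+1) _ hlen' hS' rfl)

theorem pvPlanA_eq (execution_order : List String)
    (dependencies : List (String × List String)) :
    generate_execution_plan_py execution_order dependencies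
      = pvTail dependencies execution_order 0 := by
  unfold generate_execution_plan_py
  apply pvPlanLoop_eq dependencies execution_order execution_order.length execution_order 0
      PySem.Set.empty le_rfl
  · intro s; rfl
  · simp [pvInC]

-- ----- B side: the dicts of pvRounds agree pointwise with the recurrence pvFIter -----

theorem pvFIter_succ (dependencies : List (String × List String)) (D : List String) (r : Nat)
    (t : String) : pvFIter dependencies D (r+1) t
      = pvStepF dependencies D (pvFIter dependencies D r) t := rfl

theorem pvGetD_foldl_insert_not_mem (l : List String) (v : String → Int)
    (init : PySem.Dict String Int) (t : String) (d0 : Int) (ht : t ∉ l) :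
    (l.foldl (fun acc x => acc.insert x (v x)) init).getD t d0 = init.getD t d0 := by
  induction l generalizing init with
  | nil => rfl
  | cons x l ih =>
    simp only [List.foldl_cons]
    rw [ih (fun h => ht (List.mem_cons_of_mem x h)) (init := init.insert x (v x)),
      PySem.Dict.getD_insert]
    rw [if_neg (show ¬ t = x from fun h => ht (by rw [h]; exact List.mem_cons_self))]

theorem pvGetD_foldl_insert (l : List String) (v : String → Int) :
    ∀ (init : PySem.Dict String Int) (t : String) (d0 : Int), t ∈ l →
    (l.foldl (fun acc x => acc.insert x (v x)) init).getD t d0 = v t := by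
  induction l with
  | nil => intro _ _ _ h; cases h
  | cons x l ih =>
    intro init t d0 ht
    simp only [List.foldl_cons]
    by_cases htl : t ∈ l
    · exact ih _ t d0 htl
    · have hx : t = x := by
        rcases List.mem_cons.mp ht with h | h
        · exact h
        · exact absurd h htl
      subst hx
      rw [pvGetD_foldl_insert_not_mem l v _ t d0 htl, PySem.Dict.getD_insert, if_pos rfl]

theorem pvRoundStep_getD (dependencies : List (String × List String)) (tasks : PySem.Set String)
    (n : Int) (D : List String) (lvl : PySem.Dict String Int) (t : String) (ht : t ∈ D)
    (d0 : Int) :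
    (pvRoundStep dependencies tasks n D lvl).getD t d0
      = (if (pvDepsOf dependencies t).any (fun d => !(PySem.Set.contains tasks d)) then n
         else min n (((pvDepsOf dependencies t).foldl
            (fun m d => if lvl.getD d n > m then lvl.getD d n else m) (-1)) + 1)) := by
  unfold pvRoundStep
  have hfe : ∀ (new : PySem.Dict String Int) (t' : String), t' ∈ D →
      (if (pvDepsOf dependencies t').any (fun d => !(PySem.Set.contains tasks d))
         then new.insert t' n
       else new.insert t' (min n
        (((pvDepsOf dependencies t').foldl
          (fun m d => if lvl.getD d n > m then lvl.getD d n else m) (-1)) + 1)))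
      = new.insert t'
          (if (pvDepsOf dependencies t').any (fun d => !(PySem.Set.contains tasks d)) then n
           else min n (((pvDepsOf dependencies t').foldl
              (fun m d => if lvl.getD d n > m then lvl.getD d n else m) (-1)) + 1)) := by
    intro new t' _
    by_cases hc : (pvDepsOf dependencies t').any (fun d => !(PySem.Set.contains tasks d)) = true
    · rw [if_pos hc, if_pos hc]
    · rw [if_neg hc, if_neg hc]
  rw [PySem.List.foldl_congr_mem D _
      (fun (new : PySem.Dict String Int) t' => new.insert t'
        (if (pvDepsOf dependencies t').any (fun d => !(PySem.Set.contains tasks d)) then n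
         else min n (((pvDepsOf dependencies t').foldl
            (fun m d => if lvl.getD d n > m then lvl.getD d n else m) (-1)) + 1)))
      PySem.Dict.empty hfe,
    pvGetD_foldl_insert D _ _ t d0 ht]

theorem pvRoundStep_rel (dependencies : List (String × List String)) (D : List String)
    (tasks : PySem.Set String) (hT : ∀ d, PySem.Set.contains tasks d = D.contains d)
    (g : String → Int) (lvl : PySem.Dict String Int)
    (hrel : ∀ s ∈ D, lvl.getD s ((D.length : Int)) = g s) :
    ∀ t ∈ D, (pvRoundStep dependencies tasks (D.length : Int) D lvl).getD t (D.length : Int)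
      = pvStepF dependencies D g t := by
  intro t ht
  rw [pvRoundStep_getD dependencies tasks _ D lvl t ht]
  unfold pvStepF
  simp only [hT]
  by_cases hc : (pvDepsOf dependencies t).any (fun d => !(D.contains d))
  · rw [if_pos hc, if_pos hc]
  · rw [if_neg hc, if_neg hc]
    have hall : ∀ (m : Int), ∀ d ∈ pvDepsOf dependencies t,
        (if lvl.getD d (D.length : Int) > m then lvl.getD d (D.length : Int) else m)
          = (if g d > m then g d else m) := by
      intro m d hd
      have hdD : d ∈ D := by
        by_contra hnc
        have hcon : List.contains D d = false := by simpa [List.contains_eq_mem] using hnc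
        exact hc (List.any_eq_true.mpr ⟨d, hd, by simpa [List.contains_eq_mem] using hnc⟩)
      rw [hrel d hdD]
    rw [PySem.List.foldl_congr_mem (pvDepsOf dependencies t) _ _ (-1) (fun m d hd => hall m d hd)]

theorem pvStepF_congr (dependencies : List (String × List String)) (D : List String)
    (g g' : String → Int) (h : ∀ s ∈ D, g s = g' s) :
    ∀ t, pvStepF dependencies D g t = pvStepF dependencies D g' t := by
  intro t
  unfold pvStepF
  by_cases hmiss : (pvDepsOf dependencies t).any (fun d => !(D.contains d))
  · rw [if_pos hmiss, if_pos hmiss]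
  · rw [if_neg hmiss, if_neg hmiss]
    have hall : ∀ (m : Int), ∀ d ∈ pvDepsOf dependencies t,
        (if g d > m then g d else m) = (if g' d > m then g' d else m) := by
      intro m d hd
      have hdD : d ∈ D := by
        by_contra hnc
        have hcon : List.contains D d = false := by simpa [List.contains_eq_mem] using hnc
        exact hmiss (List.any_eq_true.mpr ⟨d, hd, by simpa [List.contains_eq_mem] using hnc⟩)
      rw [h d hdD]
    rw [PySem.List.foldl_congr_mem (pvDepsOf dependencies t) _ _ (-1) (fun m d hd => hall m d hd)]

theorem pvFIter_stab (dependencies : List (String × List String)) (D : List String) (r : Nat)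
    (h : ∀ s ∈ D, pvFIter dependencies D (r+1) s = pvFIter dependencies D r s) :
    ∀ j, ∀ s ∈ D, pvFIter dependencies D (r+j) s = pvFIter dependencies D r s := by
  intro j
  induction j with
  | zero => intro s _; rfl
  | succ j ih =>
    intro s hs
    have hstep : pvFIter dependencies D (r+j+1) s = pvFIter dependencies D (r+1) s := by
      rw [pvFIter_succ, pvFIter_succ]
      exact pvStepF_congr dependencies D _ _ ih s
    rw [show r + (j+1) = (r+j)+1 from rfl, hstep, h s hs]

theorem pvRounds_rel (dependencies : List (String × List String)) (D : List String)
    (tasks : PySem.Set String) (hT : ∀ d, PySem.Set.contains tasks d = D.contains d) :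
    ∀ (fuel r : Nat) (lvl : PySem.Dict String Int),
      (∀ s ∈ D, lvl.getD s (D.length : Int) = pvFIter dependencies D r s) →
      ∀ t ∈ D, (pvRounds dependencies tasks (D.length : Int) D fuel lvl).getD t (D.length : Int)
        = pvFIter dependencies D (r+fuel) t := by
  intro fuel
  induction fuel with
  | zero => intro r lvl hrel t ht; exact hrel t ht
  | succ fuel ih =>
    intro r lvl hrel t ht
    have hnew : ∀ s ∈ D,
        (pvRoundStep dependencies tasks (D.length : Int) D lvl).getD s (D.length : Int)
          = pvFIter dependencies D (r+1) s := by
      intro s hs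
      rw [pvRoundStep_rel dependencies D tasks hT (pvFIter dependencies D r) lvl hrel s hs,
        ← pvFIter_succ]
    rw [pvRounds]
    by_cases heq : pvRoundStep dependencies tasks (D.length : Int) D lvl = lvl
    · rw [if_pos heq]
      have hstab0 : ∀ s ∈ D, pvFIter dependencies D (r+1) s = pvFIter dependencies D r s := by
        intro s hs
        rw [← hnew s hs, heq, hrel s hs]
      have hstab := pvFIter_stab dependencies D r hstab0 (fuel+1) t ht
      rw [hstab, ← hrel t ht]
    · rw [if_neg heq]
      have harith : r + (fuel+1) = (r+1) + fuel := by omega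
      rw [harith]
      exact ih (r+1) _ hnew t ht

-- ----- the recurrence pvFIter reaches, after |D| rounds, exactly the stage numbers -----

theorem pvFold_le_of (g : String → Int) (c : Int) :
    ∀ (ds : List String) (a : Int), a ≤ c → (∀ d ∈ ds, g d ≤ c) →
      ds.foldl (fun m d => if g d > m then g d else m) a ≤ c := by
  intro ds
  induction ds with
  | nil => intro a ha _; simpa using ha
  | cons x ds ih =>
    intro a ha h
    simp only [List.foldl_cons]
    apply ih
    · by_cases hx : g x > a
      · simpa [hx] using h x List.mem_cons_self
      · simpa [hx] using ha
    · exact fun d hd => h d (List.mem_cons_of_mem x hd)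

theorem pvFold_ge_init (g : String → Int) :
    ∀ (ds : List String) (a : Int), a ≤ ds.foldl (fun m d => if g d > m then g d else m) a := by
  intro ds
  induction ds with
  | nil => intro a; simp
  | cons x ds ih =>
    intro a
    simp only [List.foldl_cons]
    refine le_trans ?_ (ih (if g x > a then g x else a))
    split <;> omega

theorem pvFold_ge_mem (g : String → Int) (d0 : String) :
    ∀ (ds : List String) (a : Int), d0 ∈ ds →
      g d0 ≤ ds.foldl (fun m d => if g d > m then g d else m) a := by
  intro ds
  induction ds with
  | nil => intro a h; cases h
  | cons x ds ih =>
    intro a h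
    rcases List.mem_cons.mp h with rfl | h'
    · simp only [List.foldl_cons]
      refine le_trans ?_ (pvFold_ge_init g ds _)
      split <;> omega
    · exact ih _ h'

theorem pvFIter_le (dependencies : List (String × List String)) (D : List String) :
    ∀ (r : Nat) (t : String), pvFIter dependencies D r t ≤ (D.length : Int) := by
  intro r
  induction r with
  | zero =>
    intro t
    have h0 : pvFIter dependencies D 0 t = 0 := rfl
    rw [h0]
    exact Int.natCast_nonneg D.length
  | succ r ih =>
    intro t
    rw [pvFIter_succ]
    unfold pvStepF
    split
    · exact le_rfl
    · exact min_le_left _ _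

theorem pvLevel_exists (dependencies : List (String × List String)) (D : List String) :
    ∀ (k : Nat) (t : String), pvInC dependencies D k t = true →
      ∃ j, j < k ∧ pvAtLvl dependencies D j t = true := by
  intro k
  induction k with
  | zero => intro t h; simp [pvInC] at h
  | succ k ih =>
    intro t h
    by_cases h0 : pvInC dependencies D k t = true
    · rcases ih t h0 with ⟨j, hj, hat⟩
      exact ⟨j, by omega, hat⟩
    · exact ⟨k, by omega, by simp [pvAtLvl, h, Bool.eq_false_iff.mpr h0]⟩

theorem pvAtLvl_unique (dependencies : List (String × List String)) (D : List String)
    (j k : Nat) (t : String) (hj : pvAtLvl dependencies D j t = true)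
    (hk : pvAtLvl dependencies D k t = true) : j = k := by
  have hj1 := (Bool.and_eq_true_iff.mp hj).1
  have hj0 : pvInC dependencies D j t = false := by
    have := (Bool.and_eq_true_iff.mp hj).2; simpa using this
  have hk1 := (Bool.and_eq_true_iff.mp hk).1
  have hk0 : pvInC dependencies D k t = false := by
    have := (Bool.and_eq_true_iff.mp hk).2; simpa using this
  rcases lt_trichotomy j k with h | h | h
  · have := pvInC_mono_le dependencies D (show j+1 ≤ k by omega) t hj1
    rw [hk0] at this
    cases this
  · exact h
  · have := pvInC_mono_le dependencies D (show k+1 ≤ j by omega) t hk1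
    rw [hj0] at this
    cases this

theorem pvFIter_exact (dependencies : List (String × List String)) (D : List String) :
    ∀ (k : Nat) (t : String), pvAtLvl dependencies D k t = true →
      ∀ r, k ≤ r → pvFIter dependencies D r t = (k : Int) := by
  intro k
  induction k using Nat.strong_induction_on with
  | _ k ih =>
    intro t hat r hkr
    have h1 : pvInC dependencies D (k+1) t = true := (Bool.and_eq_true_iff.mp hat).1
    have h0 : pvInC dependencies D k t = false := by
      have := (Bool.and_eq_true_iff.mp hat).2; simpa using this
    have ht : t ∈ D := pvInC_mem dependencies D k t h1
    have hkn : k < D.length := pvLevel_lt dependencies D k t h1 h0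
    have hdeps : ∀ d ∈ pvDepsOf dependencies t, pvInC dependencies D k d = true :=
      ((pvInC_succ_iff dependencies D k t).mp h1).2
    match r, hkr with
    | 0, hkr =>
      have hk0 : k = 0 := by omega
      subst hk0
      rfl
    | r'+1, hkr =>
      rw [pvFIter_succ]
      unfold pvStepF
      match k, ih, h0, h1, hat, hdeps, hkn, hkr with
      | 0, ih, h0, h1, hat, hdeps, hkn, hkr =>
        have hds : pvDepsOf dependencies t = [] := by
          cases hds : pvDepsOf dependencies t with
          | nil => rfl
          | cons d rest =>
            exfalso
            rw [hds] at hdeps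
            have := hdeps d List.mem_cons_self
            simp [pvInC] at this
        simp only [hds, List.any_nil, Bool.false_eq_true, if_false, List.foldl_nil]
        have hn0 : (0:Int) ≤ (D.length : Int) := Int.natCast_nonneg D.length
        omega
      | k'+1, ih, h0, h1, hat, hdeps, hkn, hkr =>
        have hmem : ∀ d ∈ pvDepsOf dependencies t, d ∈ D := fun d hd =>
          pvInC_mem dependencies D k' d (hdeps d hd)
        have hmiss : (pvDepsOf dependencies t).any (fun d => !(D.contains d)) = false := by
          rw [List.any_eq_false]
          intro d hd
          simp [List.contains_eq_mem, hmem d hd]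
        rw [if_neg (by rw [hmiss]; exact Bool.false_ne_true)]
        -- every dependency already carries its exact level ≤ k'
        have hle : ∀ d ∈ pvDepsOf dependencies t, pvFIter dependencies D r' d ≤ (k' : Int) := by
          intro d hd
          rcases pvLevel_exists dependencies D (k'+1) d (hdeps d hd) with ⟨j, hj, hatd⟩
          rw [ih j (by omega) d hatd r' (by omega)]
          exact_mod_cast Nat.lt_succ_iff.mp hj
        -- and some dependency sits at exactly level k'
        have hwit : ∃ d ∈ pvDepsOf dependencies t, pvInC dependencies D k' d = false := by
          have hcont : D.contains t = true := by simpa [List.contains_eq_mem] using ht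
          rw [pvInC_succ, hcont, Bool.true_and, List.all_eq_false] at h0
          rcases h0 with ⟨d, hd, hdk⟩
          exact ⟨d, hd, by simpa using hdk⟩
        rcases hwit with ⟨d0, hd0, hd0k⟩
        have hd0at : pvAtLvl dependencies D k' d0 = true := by
          simp [pvAtLvl, hdeps d0 hd0, hd0k]
        have hd0v : pvFIter dependencies D r' d0 = (k' : Int) :=
          ih k' (by omega) d0 hd0at r' (by omega)
        have hfold_le : (pvDepsOf dependencies t).foldl
            (fun m d => if pvFIter dependencies D r' d > m then pvFIter dependencies D r' d else m)
            (-1) ≤ (k' : Int) :=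
          pvFold_le_of _ _ _ _ (by omega) hle
        have hfold_ge : (k' : Int) ≤ (pvDepsOf dependencies t).foldl
            (fun m d => if pvFIter dependencies D r' d > m then pvFIter dependencies D r' d else m)
            (-1) := by
          have := pvFold_ge_mem (pvFIter dependencies D r') d0 (pvDepsOf dependencies t) (-1) hd0
          omega
        have hkn' : ((k' : Int) + 1) < (D.length : Int) := by exact_mod_cast hkn
        push_cast
        omega

theorem pvFIter_blocked (dependencies : List (String × List String)) (D : List String) :
    ∀ (r : Nat) (t : String), t ∈ D → pvInC dependencies D (r+1) t = false →
      min ((D.length : Int)) ((r : Int)) ≤ pvFIter dependencies D r t := by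
  intro r
  induction r with
  | zero =>
    intro t _ _
    have : pvFIter dependencies D 0 t = 0 := rfl
    omega
  | succ r ih =>
    intro t ht h
    rw [pvFIter_succ]
    unfold pvStepF
    by_cases hmiss : (pvDepsOf dependencies t).any (fun d => !(D.contains d))
    · rw [if_pos hmiss]
      omega
    · rw [if_neg hmiss]
      have hcont : D.contains t = true := by simpa [List.contains_eq_mem] using ht
      have hex : ∃ d ∈ pvDepsOf dependencies t, pvInC dependencies D (r+1) d = false := by
        rw [pvInC_succ, hcont, Bool.true_and, List.all_eq_false] at h
        rcases h with ⟨d, hd, hdk⟩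
        exact ⟨d, hd, by simpa using hdk⟩
      rcases hex with ⟨d0, hd0, hblk⟩
      have hd0D : d0 ∈ D := by
        by_contra hnc
        have hcon : List.contains D d0 = false := by simpa [List.contains_eq_mem] using hnc
        exact hmiss (List.any_eq_true.mpr ⟨d0, hd0, by simpa [List.contains_eq_mem] using hnc⟩)
      have hih := ih d0 hd0D hblk
      have hge := pvFold_ge_mem (pvFIter dependencies D r) d0 (pvDepsOf dependencies t) (-1) hd0
      push_cast
      omega

-- ----- the shape of the dicts pvRounds produces: a fold of fresh inserts over D -----

theorem pvItems_foldl_insert (v : String → Int) :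
    ∀ (D : List String) (init : PySem.Dict String Int), D.Nodup →
      (∀ x ∈ D, init.contains x = false) →
      (D.foldl (fun acc x => acc.insert x (v x)) init).items
        = init.items ++ D.map (fun x => (x, v x)) := by
  intro D
  induction D with
  | nil => intro init _ _; simp
  | cons x D ih =>
    intro init hnd hfresh
    simp only [List.foldl_cons, List.map_cons]
    rw [ih _ hnd.of_cons (fun y hy => by
        have hyx : y ≠ x := fun h => (List.nodup_cons.mp hnd).1 (h ▸ hy)
        rw [PySem.Dict.contains_eq_isSome_get?, PySem.Dict.get?_insert, if_neg hyx,
          ← PySem.Dict.contains_eq_isSome_get?, hfresh y (List.mem_cons_of_mem x hy)]),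
      PySem.Dict.items_insert_of_not_contains init (v x) (hfresh x List.mem_cons_self)]
    simp

theorem pvValues_foldl_insert (v : String → Int) (D : List String) (hnd : D.Nodup) :
    (D.foldl (fun acc x => acc.insert x (v x)) PySem.Dict.empty).values = D.map v := by
  have h := pvItems_foldl_insert v D PySem.Dict.empty hnd (fun x _ => rfl)
  have hv : ∀ (d : PySem.Dict String Int), d.values = d.items.map Prod.snd := fun _ => rfl
  rw [hv, h]
  simp [show (PySem.Dict.empty : PySem.Dict String Int).items = [] from rfl, Function.comp]

theorem pvRoundStep_eq_foldl (dependencies : List (String × List String))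
    (tasks : PySem.Set String) (n : Int) (D : List String) (lvl : PySem.Dict String Int) :
    pvRoundStep dependencies tasks n D lvl
      = D.foldl (fun acc x => acc.insert x
          (if (pvDepsOf dependencies x).any (fun d => !(PySem.Set.contains tasks d)) then n
           else min n (((pvDepsOf dependencies x).foldl
              (fun m d => if lvl.getD d n > m then lvl.getD d n else m) (-1)) + 1)))
          PySem.Dict.empty := by
  unfold pvRoundStep
  apply PySem.List.foldl_congr_mem
  intro acc x _
  by_cases hc : (pvDepsOf dependencies x).any (fun d => !(PySem.Set.contains tasks d)) = true
  · rw [if_pos hc, if_pos hc]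
  · rw [if_neg hc, if_neg hc]

theorem pvRounds_shape (dependencies : List (String × List String)) (tasks : PySem.Set String)
    (n : Int) (D : List String) :
    ∀ (fuel : Nat) (lvl : PySem.Dict String Int),
      pvRounds dependencies tasks n D fuel lvl = lvl
      ∨ ∃ l2, pvRounds dependencies tasks n D fuel lvl = pvRoundStep dependencies tasks n D l2 := by
  intro fuel
  induction fuel with
  | zero => intro lvl; exact Or.inl rfl
  | succ fuel ih =>
    intro lvl
    rw [pvRounds]
    by_cases heq : pvRoundStep dependencies tasks n D lvl = lvl
    · rw [if_pos heq]
      exact Or.inr ⟨lvl, heq.symm⟩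
    · rw [if_neg heq]
      rcases ih (pvRoundStep dependencies tasks n D lvl) with h | ⟨l2, h⟩
      · exact Or.inr ⟨lvl, h⟩
      · exact Or.inr ⟨l2, h⟩

-- ----- facts about the K-computing fold of B -----

theorem pvKFold_ge_init (n : Int) :
    ∀ (vs : List Int) (a : Int),
      a ≤ vs.foldl (fun K v => if v < n && v + 1 > K then v + 1 else K) a := by
  intro vs
  induction vs with
  | nil => intro a; simp
  | cons x vs ih =>
    intro a
    simp only [List.foldl_cons]
    refine le_trans ?_ (ih (if x < n && x + 1 > a then x + 1 else a))
    by_cases hx : (x < n && x + 1 > a) = true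
    · rw [if_pos hx]
      have h2 := (Bool.and_eq_true_iff.mp hx).2
      simp only [gt_iff_lt, decide_eq_true_eq] at h2
      omega
    · rw [if_neg hx]

theorem pvKFold_ge_mem (n : Int) (v0 : Int) :
    ∀ (vs : List Int) (a : Int), v0 ∈ vs → v0 < n →
      v0 + 1 ≤ vs.foldl (fun K v => if v < n && v + 1 > K then v + 1 else K) a := by
  intro vs
  induction vs with
  | nil => intro a h; cases h
  | cons x vs ih =>
    intro a h hv0
    rcases List.mem_cons.mp h with rfl | h'
    · simp only [List.foldl_cons]
      refine le_trans ?_ (pvKFold_ge_init n vs _)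
      by_cases hgt : v0 + 1 > a
      · rw [if_pos (by simp [hv0, hgt])]
      · rw [if_neg (by simp [hgt])]
        omega
    · exact ih _ h' hv0

theorem pvKFold_le (n : Int) (c : Int) :
    ∀ (vs : List Int) (a : Int), a ≤ c → (∀ v ∈ vs, v < n → v + 1 ≤ c) →
      vs.foldl (fun K v => if v < n && v + 1 > K then v + 1 else K) a ≤ c := by
  intro vs
  induction vs with
  | nil => intro a ha _; simpa using ha
  | cons x vs ih =>
    intro a ha h
    simp only [List.foldl_cons]
    apply ih
    · by_cases hx : (x < n && x + 1 > a) = true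
      · rw [if_pos hx]
        exact h x List.mem_cons_self (by simpa using (Bool.and_eq_true_iff.mp hx).1)
      · rw [if_neg hx]
        exact ha
    · exact fun v hv => h v (List.mem_cons_of_mem x hv)

-- ----- assembling B -----

theorem pvPlanB_eq (execution_order : List String)
    (dependencies : List (String × List String)) :
    generate_execution_plan_py_alt execution_order dependencies
      = pvTail dependencies execution_order 0 := by
  unfold generate_execution_plan_py_alt pvTail
  simp only [PySem.List.dedup_eq_ofList, Nat.sub_zero]
  have hnd : (PySem.Set.ofList execution_order).Nodup := PySem.Set.nodup_ofList execution_order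
  have hT : ∀ d, PySem.Set.contains (PySem.Set.ofList (PySem.Set.ofList execution_order)) d
      = (PySem.Set.ofList execution_order).contains d := by
    intro d
    rw [PySem.Set.ofList_eq_self_of_nodup (PySem.Set.ofList execution_order) hnd,
      PySem.Set.contains_eq_listContains]
  have hrel0 : ∀ s ∈ PySem.Set.ofList execution_order,
      ((PySem.Set.ofList execution_order).foldl (fun d t => d.insert t (0:Int))
        PySem.Dict.empty).getD s (((PySem.Set.ofList execution_order).length : Int))
        = pvFIter dependencies (PySem.Set.ofList execution_order) 0 s := by
    intro s hs
    rw [pvGetD_foldl_insert (PySem.Set.ofList execution_order) (fun _ => (0:Int)) _ s _ hs]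
    rfl
  have hfin : ∀ t ∈ PySem.Set.ofList execution_order,
      (pvRounds dependencies (PySem.Set.ofList (PySem.Set.ofList execution_order))
        (((PySem.Set.ofList execution_order).length : Int)) (PySem.Set.ofList execution_order)
        (PySem.Set.ofList execution_order).length
        ((PySem.Set.ofList execution_order).foldl (fun d t => d.insert t (0:Int))
          PySem.Dict.empty)).getD t (((PySem.Set.ofList execution_order).length : Int))
        = pvFIter dependencies (PySem.Set.ofList execution_order)
            (PySem.Set.ofList execution_order).length t := by
    intro t ht
    have := pvRounds_rel dependencies (PySem.Set.ofList execution_order) _ hT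
      (PySem.Set.ofList execution_order).length 0 _ hrel0 t ht
    simpa using this
  -- the final dict is a fold of fresh inserts over the distinct tasks: extract its value function
  have hshape : ∃ f : String → Int,
      pvRounds dependencies (PySem.Set.ofList (PySem.Set.ofList execution_order))
        (((PySem.Set.ofList execution_order).length : Int)) (PySem.Set.ofList execution_order)
        (PySem.Set.ofList execution_order).length
        ((PySem.Set.ofList execution_order).foldl (fun d t => d.insert t (0:Int))
          PySem.Dict.empty)
      = (PySem.Set.ofList execution_order).foldl
          (fun acc x => acc.insert x (f x)) PySem.Dict.empty := by
    rcases pvRounds_shape dependencies (PySem.Set.ofList (PySem.Set.ofList execution_order))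
        (((PySem.Set.ofList execution_order).length : Int)) (PySem.Set.ofList execution_order)
        (PySem.Set.ofList execution_order).length
        ((PySem.Set.ofList execution_order).foldl (fun d t => d.insert t (0:Int))
          PySem.Dict.empty) with h | ⟨l2, h⟩
    · exact ⟨fun _ => (0:Int), h⟩
    · exact ⟨_, h.trans (pvRoundStep_eq_foldl dependencies _ _ _ l2)⟩
  rcases hshape with ⟨f, hshape⟩
  have hfD : ∀ t ∈ PySem.Set.ofList execution_order,
      f t = pvFIter dependencies (PySem.Set.ofList execution_order)
        (PySem.Set.ofList execution_order).length t := by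
    intro t ht
    rw [← hfin t ht, hshape, pvGetD_foldl_insert _ f _ t _ ht]
  rw [hshape, pvValues_foldl_insert f (PySem.Set.ofList execution_order) hnd]
  -- bounds for the computed number of stages K
  have hK0 : (0:Int) ≤ ((PySem.Set.ofList execution_order).map f).foldl
      (fun K v => if v < ((PySem.Set.ofList execution_order).length : Int) && v + 1 > K
                  then v + 1 else K) 0 :=
    pvKFold_ge_init _ _ _
  have hKle : ((PySem.Set.ofList execution_order).map f).foldl
      (fun K v => if v < ((PySem.Set.ofList execution_order).length : Int) && v + 1 > K
                  then v + 1 else K) 0 ≤ ((PySem.Set.ofList execution_order).length : Int) := by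
    apply pvKFold_le
    · exact Int.natCast_nonneg _
    · intro v _ hv
      omega
  -- every occupied stage number lies below K
  have hstage_hi : ∀ (j : Nat),
      (((PySem.Set.ofList execution_order).map f).foldl
        (fun K v => if v < ((PySem.Set.ofList execution_order).length : Int) && v + 1 > K
                    then v + 1 else K) 0).toNat ≤ j →
      pvStage dependencies execution_order j = [] := by
    intro j hj
    unfold pvStage
    rw [List.filter_eq_nil_iff]
    intro t ht
    cases hatj : pvAtLvl dependencies (PySem.Set.ofList execution_order) j t with
    | false => simp
    | true =>
      exfalso
      have htD : t ∈ PySem.Set.ofList execution_order :=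
        pvInC_mem dependencies _ j t (Bool.and_eq_true_iff.mp hatj).1
      have hj1 := (Bool.and_eq_true_iff.mp hatj).1
      have hj0 : pvInC dependencies (PySem.Set.ofList execution_order) j t = false := by
        have := (Bool.and_eq_true_iff.mp hatj).2; simpa using this
      have hjn : j < (PySem.Set.ofList execution_order).length :=
        pvLevel_lt dependencies (PySem.Set.ofList execution_order) j t hj1 hj0
      have hval : pvFIter dependencies (PySem.Set.ofList execution_order)
          (PySem.Set.ofList execution_order).length t = (j : Int) :=
        pvFIter_exact dependencies (PySem.Set.ofList execution_order) j t hatj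
          (PySem.Set.ofList execution_order).length (by omega)
      have hfv : f t = (j : Int) := by rw [hfD t htD, hval]
      have hmem : f t ∈ (PySem.Set.ofList execution_order).map f :=
        List.mem_map.mpr ⟨t, htD, rfl⟩
      have := pvKFold_ge_mem ((PySem.Set.ofList execution_order).length : Int) (f t)
        ((PySem.Set.ofList execution_order).map f) 0 hmem (by rw [hfv]; exact_mod_cast hjn)
      omega
  -- below K the buckets agree with the stages
  have hbucket : ∀ (j : Nat), j < (PySem.Set.ofList execution_order).length →
      execution_order.filter (fun t =>
        ((PySem.Set.ofList execution_order).foldl (fun acc x => acc.insert x (f x))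
          PySem.Dict.empty).getD t (((PySem.Set.ofList execution_order).length : Int))
          == ((j : Nat) : Int))
      = pvStage dependencies execution_order j := by
    intro j hjn
    unfold pvStage
    apply List.filter_congr
    intro t ht
    have htD : t ∈ PySem.Set.ofList execution_order :=
      (PySem.Set.mem_ofList execution_order t).mpr ht
    rw [pvGetD_foldl_insert _ f _ t _ htD, hfD t htD]
    by_cases hin : pvInC dependencies (PySem.Set.ofList execution_order)
        ((PySem.Set.ofList execution_order).length + 1) t = true
    · rcases pvLevel_exists dependencies (PySem.Set.ofList execution_order) _ t hin with
        ⟨kk, hkk, hat⟩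
      have hk1 := (Bool.and_eq_true_iff.mp hat).1
      have hk0 : pvInC dependencies (PySem.Set.ofList execution_order) kk t = false := by
        have := (Bool.and_eq_true_iff.mp hat).2; simpa using this
      have hkkn : kk < (PySem.Set.ofList execution_order).length :=
        pvLevel_lt dependencies (PySem.Set.ofList execution_order) kk t hk1 hk0
      rw [pvFIter_exact dependencies (PySem.Set.ofList execution_order) kk t hat
        (PySem.Set.ofList execution_order).length (by omega)]
      by_cases hjk : j = kk
      · subst hjk
        simp [hat]
      · have hbeq : (((kk : Nat) : Int) == ((j : Nat) : Int)) = false := by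
          simp only [beq_eq_false_iff_ne, ne_eq, Int.natCast_inj]
          omega
        rw [hbeq]
        cases hatj : pvAtLvl dependencies (PySem.Set.ofList execution_order) j t with
        | false => rfl
        | true =>
          exact absurd (pvAtLvl_unique dependencies (PySem.Set.ofList execution_order)
            j kk t hatj hat) hjk
    · have hblk : pvInC dependencies (PySem.Set.ofList execution_order)
          ((PySem.Set.ofList execution_order).length + 1) t = false := by simpa using hin
      have hge := pvFIter_blocked dependencies (PySem.Set.ofList execution_order)
        (PySem.Set.ofList execution_order).length t htD hblk
      have hle := pvFIter_le dependencies (PySem.Set.ofList execution_order)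
        (PySem.Set.ofList execution_order).length t
      have hval : pvFIter dependencies (PySem.Set.ofList execution_order)
          (PySem.Set.ofList execution_order).length t
          = ((PySem.Set.ofList execution_order).length : Int) := by omega
      rw [hval]
      have hbeq : ((((PySem.Set.ofList execution_order).length : Nat) : Int)
          == ((j : Nat) : Int)) = false := by
        simp only [beq_eq_false_iff_ne, ne_eq, Int.natCast_inj]
        omega
      rw [hbeq]
      cases hatj : pvAtLvl dependencies (PySem.Set.ofList execution_order) j t with
      | false => rfl
      | true =>
        exfalso
        have hj1 := (Bool.and_eq_true_iff.mp hatj).1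
        have := pvInC_mono_le dependencies (PySem.Set.ofList execution_order)
          (show j+1 ≤ (PySem.Set.ofList execution_order).length + 1 by omega) t hj1
        rw [hblk] at this
        cases this
  -- split the stage range of pvTail at K and drop the empty top part
  have hsplit : List.range' 0 (PySem.Set.ofList execution_order).length
      = List.range ((((PySem.Set.ofList execution_order).map f).foldl
          (fun K v => if v < ((PySem.Set.ofList execution_order).length : Int) && v + 1 > K
                      then v + 1 else K) 0).toNat)
        ++ List.range' ((((PySem.Set.ofList execution_order).map f).foldl
          (fun K v => if v < ((PySem.Set.ofList execution_order).length : Int) && v + 1 > K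
                      then v + 1 else K) 0).toNat)
          ((PySem.Set.ofList execution_order).length
            - (((PySem.Set.ofList execution_order).map f).foldl
          (fun K v => if v < ((PySem.Set.ofList execution_order).length : Int) && v + 1 > K
                      then v + 1 else K) 0).toNat) := by
    have hra := List.range'_append
      (s := 0)
      (m := (((PySem.Set.ofList execution_order).map f).foldl
        (fun K v => if v < ((PySem.Set.ofList execution_order).length : Int) && v + 1 > K
                    then v + 1 else K) 0).toNat)
      (n := (PySem.Set.ofList execution_order).length
        - (((PySem.Set.ofList execution_order).map f).foldl
          (fun K v => if v < ((PySem.Set.ofList execution_order).length : Int) && v + 1 > K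
                      then v + 1 else K) 0).toNat)
      (step := 1)
    simp only [Nat.zero_add, Nat.one_mul] at hra
    rw [List.range_eq_range', hra]
    congr 1
    omega
  rw [hsplit, List.map_append, List.filter_append]
  have hhi : ((List.range' ((((PySem.Set.ofList execution_order).map f).foldl
      (fun K v => if v < ((PySem.Set.ofList execution_order).length : Int) && v + 1 > K
                  then v + 1 else K) 0).toNat)
      ((PySem.Set.ofList execution_order).length
        - (((PySem.Set.ofList execution_order).map f).foldl
          (fun K v => if v < ((PySem.Set.ofList execution_order).length : Int) && v + 1 > K
                      then v + 1 else K) 0).toNat)).map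
      (pvStage dependencies execution_order)).filter (fun s => !s.isEmpty) = [] := by
    rw [List.filter_eq_nil_iff]
    intro s hs
    rcases List.mem_map.mp hs with ⟨j, hj, rfl⟩
    rw [hstage_hi j (List.mem_range'_1.mp hj).1]
    simp
  rw [hhi, List.append_nil]
  apply congrArg (List.filter _)
  apply List.map_congr_left
  intro j hj
  refine hbucket j (lt_of_lt_of_le (List.mem_range.mp hj) ?_)
  exact (show (((PySem.Set.ofList execution_order).map f).foldl
      (fun K v => if v < ((PySem.Set.ofList execution_order).length : Int) && v + 1 > K
                  then v + 1 else K) 0).toNat ≤ (PySem.Set.ofList execution_order).length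
    by omega)
-- ===== VERDICT (by name: the statement is the Claim_ definition above) =====
theorem generate_execution_plan_py_spec : Claim_equal_generate_execution_plan_py := by
  intro execution_order dependencies _
  unfold Spec_generate_execution_plan_py
  rw [pvPlanA_eq, pvPlanB_eq]
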